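-- pv_equiv track=rewrite | github.com/deepadmax/twitch-app | message.py | TwitchMessage
-- ===== SOURCE A (Python) =====
-- from collections import namedtuple
--
-- _TwitchMessage = namedtuple('TwitchMessage', [
--     'prefix',
--     'user',
--     'channel',
--     'text',
--     'irc_command',
--     'irc_args'
-- ])
--
-- def TwitchMessage(string):
--     """Parses a string received from the Twitch IRC
--     into a TwitchMessage object"""
--
--     parts = string.split(' ')
--
--     # Initialize all fields as None,
--     # so that the message is always valid
--     prefix = None
--     user = None
--     channel = None
--     text = None
--     irc_command = None
--     irc_args = None
--
--
--     # If the first part starts with a colon,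
--     # we know that it's the prefix and can set it
--     if parts[0].startswith(':'):
--         prefix = parts[0][1:]
--
--         # Extract user from prefix
--         user = get_user_from_prefix(prefix)
--
--         # Remove prefix from parts
--         parts = parts[1:]
--
--
--     # Find and extract message content
--     text_start = next((i for i, part in enumerate(parts) if part.startswith(':')), None)
--
--     if text_start is not None:
--         # All words of the message text
--         # lie in front of and includes this index
--         text_parts = parts[text_start:]
--
--         # Remove starting colon from first word
--         text_parts[0] = text_parts[0][1:]
--
--         # Join all words back together for the full content
--         text = ' '.join(text_parts)
--
--         # Remove all text from parts
--         parts = parts[:text_start]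
--
--
--     # Get the IRC command and arguments
--     # from the remaining parts
--     irc_command = parts[0]
--     irc_args = parts[1:]
--
--
--     # Find channel in IRC commands
--     hash_start = next((i for i, part in enumerate(irc_args) if part.startswith('#')), None)
--
--     if hash_start is not None:
--         channel = irc_args[hash_start][1:]
--
--
--     return _TwitchMessage(
--         prefix=prefix,
--         user=user,
--         channel=channel,
--         text=text,
--         irc_command=irc_command,
--         irc_args=irc_args
--     )
--
-- def get_user_from_prefix(prefix):
--     """Extract user from message prefix"""
--
--     domain = prefix.split('!')[0]
--
--     if domain.endswith('.tmi.twitch.tv'):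
--         return domain[:-len('.tmi.twitch.tv')]
--
--     if 'tmi.twitch.tv' not in domain:
--         return domain
--
--     return None
-- ===== SOURCE B (Python) =====
-- from collections import namedtuple
--
-- _TwitchMessage = namedtuple('TwitchMessage', [
--     'prefix', 'user', 'channel', 'text', 'irc_command', 'irc_args'
-- ])
--
-- def get_user_from_prefix(prefix):
--     """Extract user from message prefix"""
--     domain = prefix.split('!')[0]
--     if domain.endswith('.tmi.twitch.tv'):
--         return domain[:-len('.tmi.twitch.tv')]
--     if 'tmi.twitch.tv' not in domain:
--         return domain
--     return None
--
-- def TwitchMessage(string):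
--     """Parses a Twitch IRC line at the string level: peel the optional
--     ':'-prefix token, cut once at the first ' :' for the trailing text,
--     then split only the IRC portion."""
--     prefix = user = None
--     rest = string
--     if rest.startswith(':'):
--         head, _, rest = rest.partition(' ')
--         prefix = head[1:]
--         user = get_user_from_prefix(prefix)
--
--     text = None
--     cut = rest.find(' :')
--     if cut != -1:
--         rest, text = rest[:cut], rest[cut + 2:]
--
--     tokens = rest.split(' ')
--     irc_command = tokens[0]
--     irc_args = tokens[1:]
--
--     channel = None
--     for arg in irc_args:
--         if arg.startswith('#'):
--             channel = arg[1:]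
--             break
--
--     return _TwitchMessage(prefix, user, channel, text, irc_command, irc_args)
-- ===== Notes on version B (the rewrite author's own statement) =====
-- stated objective: alternative
-- what changed: B parses at the string level - it peels the optional ':'-prefix token with one partition at the first space, cuts the line once at the first ' :' to separate trailing text, and only then splits the remaining IRC portion into tokens - instead of A's splitting the whole line into tokens up front and scanning/slicing/re-joining the token list.
import Mathlib
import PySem

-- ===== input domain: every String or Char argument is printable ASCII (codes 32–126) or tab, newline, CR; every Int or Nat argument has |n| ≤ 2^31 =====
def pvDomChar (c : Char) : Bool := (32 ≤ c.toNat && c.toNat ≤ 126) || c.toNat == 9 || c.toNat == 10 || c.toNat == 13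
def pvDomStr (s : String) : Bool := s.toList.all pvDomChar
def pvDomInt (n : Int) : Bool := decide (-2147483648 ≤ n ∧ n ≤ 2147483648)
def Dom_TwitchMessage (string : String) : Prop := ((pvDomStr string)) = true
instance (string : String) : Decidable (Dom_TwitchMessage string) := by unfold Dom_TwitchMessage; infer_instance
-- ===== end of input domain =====

-- B parses the line at the string level (peel prefix token, one cut at the first " :")
-- instead of A's token-list scanning; objective: alternative decomposition, same cost.

-- ===== PORT A =====
-- shared helper: get_user_from_prefix (used verbatim by both Pythons)
def getUserFromPrefix (pfx : String) : Option String :=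
  -- domain = prefix.split('!')[0]
  let domain := ((PySem.Str.split? pfx "!").getD []).headD ""
  if PySem.Str.endswith domain ".tmi.twitch.tv" then
    some (PySem.Str.slice domain none (some (-14)))   -- domain[:-len('.tmi.twitch.tv')]
  else if !(PySem.Str.isIn "tmi.twitch.tv" domain) then
    some domain
  else
    none

def TwitchMessage (string : String) : Option String × Option String × Option String × Option String × String × List String :=
  let parts := (PySem.Str.split? string " ").getD []
  -- if parts[0].startswith(':'): prefix, user, parts = ...
  let st1 : Option String × Option String × List String :=
    if PySem.Str.startswith (parts.headD "") ":" then
      let pfx := PySem.Str.slice (parts.headD "") (some 1) none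
      (some pfx, getUserFromPrefix pfx, PySem.List.slice parts (some 1) none)
    else (none, none, parts)
  match st1 with
  | (pfx, user, parts) =>
    -- text_start = next((i for i, part in enumerate(parts) if part.startswith(':')), None)
    let textStart := parts.findIdx? (fun part => PySem.Str.startswith part ":")
    let st2 : Option String × List String :=
      match textStart with
      | some i =>
        let textParts := PySem.List.slice parts (some (i : Int)) none
        let textParts := match textParts with
          | t :: ts => PySem.Str.slice t (some 1) none :: ts
          | [] => []
        (some (PySem.Str.join " " textParts), PySem.List.slice parts none (some (i : Int)))
      | none => (none, parts)
    match st2 with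
    | (text, parts) =>
      let ircCommand := parts.headD ""      -- parts[0]; parts = [] raises and is outside Pre_
      let ircArgs := PySem.List.slice parts (some 1) none
      -- hash_start = next((i for i, part in enumerate(irc_args) if part.startswith('#')), None)
      let channel : Option String :=
        match ircArgs.findIdx? (fun part => PySem.Str.startswith part "#") with
        | some i => some (PySem.Str.slice (ircArgs.getD i "") (some 1) none)
        | none => none
      (pfx, user, channel, text, ircCommand, ircArgs)

-- ===== PORT B =====
def TwitchMessage_alt (string : String) : Option String × Option String × Option String × Option String × String × List String :=
  let st1 : Option String × Option String × String :=
    if PySem.Str.startswith string ":" then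
      -- head, _, rest = string.partition(' ')   (exact: cut at the first ' ', or no cut)
      let i := PySem.Str.find string " "
      let head := if i = -1 then string else PySem.Str.slice string none (some i)
      let rest := if i = -1 then "" else PySem.Str.slice string (some (i + 1)) none
      let pfx := PySem.Str.slice head (some 1) none
      (some pfx, getUserFromPrefix pfx, rest)
    else (none, none, string)
  match st1 with
  | (pfx, user, rest) =>
    let cut := PySem.Str.find rest " :"
    let st2 : String × Option String :=
      if cut ≠ -1 then
        (PySem.Str.slice rest none (some cut), some (PySem.Str.slice rest (some (cut + 2)) none))
      else (rest, none)
    match st2 with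
    | (rest, text) =>
      let tokens := (PySem.Str.split? rest " ").getD []
      let ircCommand := tokens.headD ""
      let ircArgs := tokens.tail
      let channel := (ircArgs.find? (fun arg => PySem.Str.startswith arg "#")).map
        (fun arg => PySem.Str.slice arg (some 1) none)
      (pfx, user, channel, text, ircCommand, ircArgs)

-- ===== PRECONDITION & SPEC =====
-- Pre_ excludes exactly the inputs on which A raises IndexError: those where, after the
-- optional leading ':'-prefix token is removed, no token is left or the first remaining
-- token itself starts with ':'.
def Pre_TwitchMessage (string : String) : Prop :=
  string.toList.head? = some ':' →
    (' ' ∈ string.toList ∧ ((string.toList.dropWhile (· ≠ ' ')).tail.head? ≠ some ':'))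
instance (string : String) : Decidable (Pre_TwitchMessage string) := by unfold Pre_TwitchMessage; infer_instance

def pvWitness_TwitchMessage : String := ":nick!nick@nick.tmi.twitch.tv PRIVMSG #chan :hello world"

def Spec_TwitchMessage (string : String) (out : Option String × Option String × Option String × Option String × String × List String) : Prop := out = TwitchMessage_alt string
instance (string : String) (out : Option String × Option String × Option String × Option String × String × List String) : Decidable (Spec_TwitchMessage string out) := by unfold Spec_TwitchMessage; infer_instance

-- ===== CLAIM (what is proved, stated in full; the proofs are below) =====
def Claim_equal_TwitchMessage : Prop := ∀ (string : String), Dom_TwitchMessage string → Pre_TwitchMessage string → Spec_TwitchMessage string (TwitchMessage string)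

-- ===== LEMMAS AND PROOFS =====

lemma findgo_nil (sub : List Char) (k : Nat) (h : sub ≠ []) :
    PySem.Chars.find.go sub [] k = -1 := by
  simp [PySem.Chars.find.go, List.isEmpty_iff, h]

lemma findgo_cons (sub : List Char) (c : Char) (cs : List Char) (k : Nat) :
    PySem.Chars.find.go sub (c :: cs) k =
      if sub.isPrefixOf (c :: cs) then (k : Int) else PySem.Chars.find.go sub cs (k + 1) := by
  simp [PySem.Chars.find.go]

lemma findgo_shift (sub : List Char) (h : sub ≠ []) :
    ∀ (cs : List Char) (k : Nat), PySem.Chars.find.go sub cs k =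
      if PySem.Chars.find cs sub = -1 then -1 else PySem.Chars.find cs sub + k := by
  intro cs
  induction cs with
  | nil => intro k; simp [PySem.Chars.find, findgo_nil _ _ h]
  | cons c cs ih =>
    intro k
    have hfind : PySem.Chars.find (c :: cs) sub = PySem.Chars.find.go sub (c :: cs) 0 := rfl
    rw [findgo_cons, hfind, findgo_cons]
    by_cases hp : sub.isPrefixOf (c :: cs)
    · simp [hp]
    · rw [if_neg hp, if_neg hp]
      have hge : -1 ≤ PySem.Chars.find cs sub := PySem.Chars.neg_one_le_find cs sub
      rw [ih (k+1), ih (0+1)]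
      by_cases hn : PySem.Chars.find cs sub = -1
      · simp [hn]
      · have : ¬ (PySem.Chars.find cs sub + 1 = -1) := by omega
        simp only [hn, if_false]
        omega

lemma findgo_skip {t0 : List Char} (h0 : ' ' ∉ t0) (sub' l : List Char) :
    ∀ k : Nat, PySem.Chars.find.go (' ' :: sub') (t0 ++ l) k =
      PySem.Chars.find.go (' ' :: sub') l (k + t0.length) := by
  induction t0 with
  | nil => intro k; simp
  | cons c t0 ih =>
    intro k
    have hc : c ≠ ' ' := fun h => h0 (h ▸ List.mem_cons_self ..)
    rw [List.cons_append, findgo_cons]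
    have : ¬ (' ' :: sub').isPrefixOf (c :: (t0 ++ l)) := by
      simp [List.isPrefixOf]
      intro h; exact absurd h.symm hc
    rw [if_neg this, ih (fun h => h0 (List.mem_cons_of_mem _ h))]
    congr 1
    simp; omega

lemma find_append_space {t0 : List Char} (h0 : ' ' ∉ t0) (u : List Char) :
    PySem.Chars.find (t0 ++ ' ' :: u) [' ', ':'] =
      if u.head? = some ':' then (t0.length : Int)
      else if PySem.Chars.find u [' ', ':'] = -1 then -1
      else PySem.Chars.find u [' ', ':'] + (t0.length + 1) := by
  have h1 : PySem.Chars.find (t0 ++ ' ' :: u) [' ', ':'] =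
      PySem.Chars.find.go [' ', ':'] (t0 ++ ' ' :: u) 0 := rfl
  rw [h1, findgo_skip h0, findgo_cons]
  by_cases hu : u.head? = some ':'
  · have : ([' ', ':'] : List Char).isPrefixOf (' ' :: u) := by
      cases u with
      | nil => simp at hu
      | cons a u => simp at hu; simp [List.isPrefixOf, hu]
    simp [this, hu]
  · have : ¬ ([' ', ':'] : List Char).isPrefixOf (' ' :: u) := by
      cases u with
      | nil => simp [List.isPrefixOf]
      | cons a u =>
        simp at hu
        simp [List.isPrefixOf]
        intro h; exact absurd h.symm hu
    rw [if_neg this, findgo_shift _ (by simp)]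
    simp only [hu, if_false]
    by_cases hn : PySem.Chars.find u [' ', ':'] = -1
    · simp [hn]
    · simp only [hn, if_false]; omega

lemma find_space_pos {t0 : List Char} (h0 : ' ' ∉ t0) (u : List Char) :
    PySem.Chars.find (t0 ++ ' ' :: u) [' '] = (t0.length : Int) := by
  have h1 : PySem.Chars.find (t0 ++ ' ' :: u) [' '] =
      PySem.Chars.find.go [' '] (t0 ++ ' ' :: u) 0 := rfl
  rw [h1, findgo_skip h0, findgo_cons]
  simp [List.isPrefixOf]

lemma find_no_space {cs : List Char} (h : ' ' ∉ cs) :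
    PySem.Chars.find cs [' ', ':'] = -1 := by
  rw [PySem.Chars.find_eq_neg_one_iff]
  intro hinf
  exact h (hinf.subset (by simp))

lemma splitgo_nil (sep cur : List Char) (fuel : Nat) (acc : List (List Char)) :
    PySem.Chars.splitOn.go sep fuel [] cur acc = (cur.reverse :: acc).reverse := by
  cases fuel <;> simp [PySem.Chars.splitOn.go]

lemma splitgo_zero (sep l cur : List Char) (acc : List (List Char)) :
    PySem.Chars.splitOn.go sep 0 l cur acc = ((cur.reverse ++ l) :: acc).reverse := by
  simp [PySem.Chars.splitOn.go]

lemma splitgo_cons (sep : List Char) (fuel : Nat) (c : Char) (l cur : List Char) (acc : List (List Char)) :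
    PySem.Chars.splitOn.go sep (fuel + 1) (c :: l) cur acc =
      if sep.isPrefixOf (c :: l) then
        PySem.Chars.splitOn.go sep fuel (List.drop sep.length (c :: l)) [] (cur.reverse :: acc)
      else PySem.Chars.splitOn.go sep fuel l (c :: cur) acc := by
  simp [PySem.Chars.splitOn.go]

lemma splitgo_acc (sep : List Char) :
    ∀ (fuel : Nat) (l cur : List Char) (acc : List (List Char)),
      PySem.Chars.splitOn.go sep fuel l cur acc = acc.reverse ++ PySem.Chars.splitOn.go sep fuel l cur [] := by
  intro fuel
  induction fuel with
  | zero => intro l cur acc; simp [splitgo_zero]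
  | succ fuel ih =>
    intro l cur acc
    cases l with
    | nil => simp [splitgo_nil]
    | cons c l =>
      rw [splitgo_cons, splitgo_cons]
      by_cases hp : sep.isPrefixOf (c :: l)
      · rw [if_pos hp, if_pos hp, ih _ _ (cur.reverse :: acc), ih _ _ ([cur.reverse])]
        simp
      · rw [if_neg hp, if_neg hp, ih l (c :: cur) acc]

lemma splitgo_skip {t0 : List Char} (h0 : ' ' ∉ t0) :
    ∀ (fuel : Nat) (l cur : List Char) (acc : List (List Char)), t0.length ≤ fuel →
      PySem.Chars.splitOn.go [' '] fuel (t0 ++ l) cur acc =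
        PySem.Chars.splitOn.go [' '] (fuel - t0.length) l (t0.reverse ++ cur) acc := by
  induction t0 with
  | nil => intro fuel l cur acc _; simp
  | cons c t0 ih =>
    intro fuel l cur acc hf
    have hc : c ≠ ' ' := fun h => h0 (h ▸ List.mem_cons_self ..)
    have h0' : ' ' ∉ t0 := fun h => h0 (List.mem_cons_of_mem _ h)
    simp at hf
    obtain ⟨f, rfl⟩ : ∃ f, fuel = f + 1 := ⟨fuel - 1, by omega⟩
    rw [List.cons_append, splitgo_cons]
    have : ¬ ([' '] : List Char).isPrefixOf (c :: (t0 ++ l)) := by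
      simp [List.isPrefixOf]
      intro h; exact absurd h.symm hc
    rw [if_neg this, ih h0' f l (c :: cur) acc (by omega)]
    have harg : t0.reverse ++ (c :: cur) = (c :: t0).reverse ++ cur := by simp
    have hfe : f - t0.length = f + 1 - (t0.length + 1) := by omega
    rw [harg, hfe]
    simp

lemma splitOn_no_space {t0 : List Char} (h0 : ' ' ∉ t0) :
    PySem.Chars.splitOn t0 [' '] = [t0] := by
  have h : PySem.Chars.splitOn t0 [' '] = PySem.Chars.splitOn.go [' '] (t0.length + 1) t0 [] [] := rfl
  rw [h]
  have := splitgo_skip h0 (t0.length + 1) [] [] [] (by omega)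
  simp at this
  rw [this, splitgo_nil]
  simp

lemma splitOn_append_space {t0 : List Char} (h0 : ' ' ∉ t0) (u : List Char) :
    PySem.Chars.splitOn (t0 ++ ' ' :: u) [' '] = t0 :: PySem.Chars.splitOn u [' '] := by
  have h : PySem.Chars.splitOn (t0 ++ ' ' :: u) [' '] =
      PySem.Chars.splitOn.go [' '] ((t0 ++ ' ' :: u).length + 1) (t0 ++ ' ' :: u) [] [] := rfl
  rw [h, splitgo_skip h0 _ _ _ _ (by simp; omega)]
  have hlen : (t0 ++ ' ' :: u).length + 1 - t0.length = u.length + 2 := by simp; omega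
  rw [hlen, splitgo_cons]
  have : ([' '] : List Char).isPrefixOf (' ' :: u) := by simp [List.isPrefixOf]
  rw [if_pos this]
  simp only [List.length_cons, List.drop_succ_cons, List.append_nil, List.reverse_reverse]
  rw [splitgo_acc]
  rfl

lemma splitOn_props : ∀ (n : Nat) (cs : List Char), cs.length ≤ n →
    (∃ rest, PySem.Chars.splitOn cs [' '] = cs.takeWhile (· ≠ ' ') :: rest) ∧
    PySem.Chars.join [' '] (PySem.Chars.splitOn cs [' ']) = cs ∧
    (∀ t ∈ PySem.Chars.splitOn cs [' '], ' ' ∉ t) := by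
  intro n
  induction n with
  | zero =>
    intro cs h
    have : cs = [] := by cases cs <;> simp_all
    subst this
    refine ⟨⟨[], by simp [splitOn_no_space]⟩, ?_, ?_⟩
    · rw [splitOn_no_space (by simp)]
      exact PySem.Chars.join_singleton _ _
    · rw [splitOn_no_space (by simp)]; simp
  | succ n ih =>
    intro cs hn
    by_cases hsp : ' ' ∈ cs
    · -- decompose cs = t0 ++ ' ' :: u
      set t0 := cs.takeWhile (· ≠ ' ') with ht0
      have hdw : cs.dropWhile (· ≠ ' ') ≠ [] := by
        simp only [ne_eq, List.dropWhile_eq_nil_iff]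
        push Not
        exact ⟨' ', hsp, by simp⟩
      obtain ⟨d, u, hdu⟩ : ∃ d u, cs.dropWhile (· ≠ ' ') = d :: u := by
        cases h : cs.dropWhile (· ≠ ' ') with
        | nil => exact absurd h hdw
        | cons d u => exact ⟨d, u, rfl⟩
      have hd : d = ' ' := by
        have hh := List.head_dropWhile_not (fun c => decide (c ≠ ' ')) hdw
        simp only [hdu] at hh
        simpa using hh
      subst hd
      have hcs : cs = t0 ++ ' ' :: u := by
        rw [ht0, ← hdu, List.takeWhile_append_dropWhile]
      have h0 : ' ' ∉ t0 := by
        intro h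
        have := List.mem_takeWhile_imp h
        simp at this
      have hu : u.length ≤ n := by
        have : cs.length = t0.length + 1 + u.length := by rw [hcs]; simp; omega
        omega
      obtain ⟨⟨rest, hr⟩, hj, hns⟩ := ih u hu
      rw [hcs, splitOn_append_space h0]
      refine ⟨⟨PySem.Chars.splitOn u [' '], rfl⟩, ?_, ?_⟩
      · rw [hr, PySem.Chars.join_cons_cons, ← hr, hj]
        simp
      · intro t ht
        rcases List.mem_cons.mp ht with rfl | ht
        · exact h0
        · exact hns t ht
    · rw [splitOn_no_space hsp]
      refine ⟨⟨[], by rw [List.takeWhile_eq_self_iff.mpr (by intro a ha; simp; exact fun h => hsp (h ▸ ha))]⟩, ?_, ?_⟩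
      · exact PySem.Chars.join_singleton _ _
      · simpa using hsp

lemma startswith_single (t : List Char) (c : Char) :
    PySem.Chars.startswith t [c] = true ↔ t.head? = some c := by
  rw [PySem.Chars.startswith_iff]
  cases t <;> simp [eq_comm]

lemma join_head? (t1 : List Char) (r : List (List Char)) (c : Char) (hc : c ≠ ' ') :
    (PySem.Chars.join [' '] (t1 :: r)).head? = some c ↔ t1.head? = some c := by
  cases r with
  | nil => rw [PySem.Chars.join_singleton]
  | cons t2 r =>
    rw [PySem.Chars.join_cons_cons]
    cases t1 with
    | nil =>
      simp
      intro h
      exact hc h.symm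
    | cons a t1 => simp

lemma join_sp_cons (t1 : List Char) (t2 : List Char) (r : List (List Char)) :
    PySem.Chars.join [' '] (t1 :: t2 :: r) = t1 ++ ' ' :: PySem.Chars.join [' '] (t2 :: r) := by
  rw [PySem.Chars.join_cons_cons]
  simp

lemma main_scan : ∀ (r : List (List Char)) (t1 : List Char), ' ' ∉ t1 → (∀ t ∈ r, ' ' ∉ t) →
    (match r.findIdx? (fun t => t.head? == some ':') with
     | none =>
         PySem.Chars.find (PySem.Chars.join [' '] (t1 :: r)) [' ', ':'] = -1 ∧
         PySem.Chars.splitOn (PySem.Chars.join [' '] (t1 :: r)) [' '] = t1 :: r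
     | some j =>
         0 ≤ PySem.Chars.find (PySem.Chars.join [' '] (t1 :: r)) [' ', ':'] ∧
         PySem.Chars.splitOn ((PySem.Chars.join [' '] (t1 :: r)).take
             (PySem.Chars.find (PySem.Chars.join [' '] (t1 :: r)) [' ', ':']).toNat) [' '] = t1 :: r.take j ∧
         (PySem.Chars.join [' '] (t1 :: r)).drop
             ((PySem.Chars.find (PySem.Chars.join [' '] (t1 :: r)) [' ', ':']).toNat + 2) =
           PySem.Chars.join [' '] (match r.drop j with | x :: xs => x.tail :: xs | [] => [])) := by
  intro r
  induction r with
  | nil =>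
    intro t1 h1 _
    simp only [List.findIdx?_nil]
    rw [PySem.Chars.join_singleton]
    exact ⟨find_no_space h1, splitOn_no_space h1⟩
  | cons t2 r ih =>
    intro t1 h1 hr
    have h2 : ' ' ∉ t2 := hr t2 (List.mem_cons_self ..)
    have hr' : ∀ t ∈ r, ' ' ∉ t := fun t ht => hr t (List.mem_cons_of_mem _ ht)
    have hu : PySem.Chars.join [' '] (t1 :: t2 :: r) = t1 ++ ' ' :: PySem.Chars.join [' '] (t2 :: r) :=
      join_sp_cons t1 t2 r
    set v := PySem.Chars.join [' '] (t2 :: r) with hv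
    rw [List.findIdx?_cons]
    by_cases hc : t2.head? = some ':'
    · -- first remaining token starts with ':'
      have hvc : v.head? = some ':' := (join_head? t2 r ':' (by decide)).mpr hc
      simp only [hc, beq_self_eq_true]  -- findIdx? = some 0
      rw [hu, find_append_space h1, if_pos hvc]
      refine ⟨by positivity, ?_, ?_⟩
      · have : ((t1.length : Int)).toNat = t1.length := by omega
        rw [this, List.take_left]
        rw [splitOn_no_space h1]
        simp
      · have : ((t1.length : Int)).toNat + 2 = t1.length + 2 := by omega
        rw [this]
        have hdrop : (t1 ++ ' ' :: v).drop (t1.length + 2) = v.drop 1 := by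
          have hgen := List.drop_length_add_append (l₁ := t1) (l₂ := ' ' :: v) 2
          simp only [List.drop_succ_cons, List.drop_one] at hgen
          rw [hgen, List.drop_one]
        rw [hdrop]
        obtain ⟨a, t2', rfl⟩ : ∃ a t2', t2 = a :: t2' := by
          cases t2 with
          | nil => simp at hc
          | cons a t2' => exact ⟨a, t2', rfl⟩
        simp only [List.drop_zero]
        cases r with
        | nil =>
          rw [PySem.Chars.join_singleton] at hv
          rw [hv, PySem.Chars.join_singleton]
          simp
        | cons t3 r' =>
          rw [join_sp_cons] at hv
          rw [hv, join_sp_cons]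
          simp
    · have hvc : v.head? ≠ some ':' := fun h => hc ((join_head? t2 r ':' (by decide)).mp h)
      have hcb : (t2.head? == some ':') = false := by simp [hc]
      simp only [hcb, Bool.false_eq_true, if_false]
      have IH := ih t2 h2 hr'
      rw [← hv] at IH
      cases hidx : r.findIdx? (fun t => t.head? == some ':') with
      | none =>
        rw [hidx] at IH
        simp only [Option.map_none]
        obtain ⟨hf, hs⟩ := IH
        rw [hu, find_append_space h1, if_neg hvc, if_pos hf]
        exact ⟨rfl, by rw [splitOn_append_space h1, hs]⟩
      | some j =>
        rw [hidx] at IH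
        simp only [Option.map_some]
        obtain ⟨hf0, hsplit, hdrop⟩ := IH
        have hfne : ¬ PySem.Chars.find v [' ', ':'] = -1 := by omega
        rw [hu, find_append_space h1, if_neg hvc, if_neg hfne]
        set k := PySem.Chars.find v [' ', ':'] with hk
        refine ⟨by omega, ?_, ?_⟩
        · have h1' : (k + (t1.length + 1)).toNat = t1.length + 1 + k.toNat := by omega
          rw [h1']
          have htake : (t1 ++ ' ' :: v).take (t1.length + 1 + k.toNat) = t1 ++ ' ' :: v.take k.toNat := by
            rw [List.take_append]
            have e1 : t1.take (t1.length + 1 + k.toNat) = t1 := List.take_of_length_le (by omega)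
            have e2 : t1.length + 1 + k.toNat - t1.length = k.toNat + 1 := by omega
            rw [e1, e2]
            simp
          rw [htake, splitOn_append_space h1, hsplit]
          simp
        · have h2' : (k + (t1.length + 1)).toNat + 2 = t1.length + 1 + (k.toNat + 2) := by omega
          rw [h2']
          have hd : (t1 ++ ' ' :: v).drop (t1.length + 1 + (k.toNat + 2)) = v.drop (k.toNat + 2) := by
            have h3 : t1.length + 1 + (k.toNat + 2) = (t1 ++ [' ']).length + (k.toNat + 2) := by simp
            rw [h3, show t1 ++ ' ' :: v = (t1 ++ [' ']) ++ v by simp, List.drop_length_add_append]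
          rw [hd, hdrop]
          simp only [List.drop_succ_cons]

-- ---------- glue between String-level ports and List Char lemmas ----------

def decolonTail : List (List Char) → List (List Char)
  | x :: xs => x.tail :: xs
  | [] => []

def chanOf (args : List String) : Option String :=
  (args.find? (fun a => PySem.Str.startswith a "#")).map (fun a => PySem.Str.slice a (some 1) none)

def coreResult (pfx user : Option String) (t1 : List Char) (r : List (List Char)) :
    Option String × Option String × Option String × Option String × String × List String :=
  match r.findIdx? (fun t => t.head? == some ':') with
  | none => (pfx, user, chanOf (r.map String.ofList), none, String.ofList t1, r.map String.ofList)
  | some j => (pfx, user, chanOf ((r.take j).map String.ofList),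
      some (String.ofList (PySem.Chars.join [' '] (decolonTail (r.drop j)))),
      String.ofList t1, (r.take j).map String.ofList)

lemma startswith_ofList (t : List Char) (c : Char) :
    PySem.Str.startswith (String.ofList t) (String.ofList [c]) = (t.head? == some c) := by
  rw [PySem.Str.startswith_eq, String.toList_ofList, String.toList_ofList]
  by_cases h : t.head? = some c
  · simp [h, (startswith_single t c).mpr h]
  · have : ¬ PySem.Chars.startswith t [c] = true := fun hh => h ((startswith_single t c).mp hh)
    simp only [Bool.not_eq_true] at this
    simp [this, h]

lemma colon_str : (":" : String) = String.ofList [':'] := rfl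

lemma slice_drop_ofList (t : List Char) :
    PySem.Str.slice (String.ofList t) (some 1) none = String.ofList (t.drop 1) := by
  rw [← String.toList_inj, PySem.Str.toList_slice, String.toList_ofList, String.toList_ofList,
      PySem.Chars.slice_eq_listSlice, PySem.List.slice_from t (by omega : (0:Int) ≤ 1)]
  rfl

lemma takeWhile_head? (cs : List Char) (c : Char) (hc : c ≠ ' ') :
    (cs.takeWhile (· ≠ ' ')).head? = some c ↔ cs.head? = some c := by
  cases cs with
  | nil => simp
  | cons a cs =>
    by_cases ha : a = ' '
    · subst ha
      simp [List.takeWhile]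
      exact fun h => hc h.symm
    · simp [List.takeWhile, ha]

lemma space_decomp (cs : List Char) (hsp : ' ' ∈ cs) :
    cs = cs.takeWhile (· ≠ ' ') ++ ' ' :: (cs.dropWhile (· ≠ ' ')).tail ∧
    ' ' ∉ cs.takeWhile (· ≠ ' ') := by
  have hdw : cs.dropWhile (· ≠ ' ') ≠ [] := by
    simp only [ne_eq, List.dropWhile_eq_nil_iff]
    push Not
    exact ⟨' ', hsp, by simp⟩
  obtain ⟨d, u, hdu⟩ : ∃ d u, cs.dropWhile (· ≠ ' ') = d :: u := by
    cases h : cs.dropWhile (· ≠ ' ') with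
    | nil => exact absurd h hdw
    | cons d u => exact ⟨d, u, rfl⟩
  have hd : d = ' ' := by
    have hh := List.head_dropWhile_not (fun c => decide (c ≠ ' ')) hdw
    simp only [hdu] at hh
    simpa using hh
  subst hd
  constructor
  · conv_lhs => rw [← List.takeWhile_append_dropWhile (p := fun c => decide (c ≠ ' ')) (l := cs)]
    rw [hdu]
    simp
  · intro h
    have := List.mem_takeWhile_imp h
    simp at this

lemma split?_toList (s : String) :
    (PySem.Str.split? s " ").getD [] = (PySem.Chars.splitOn s.toList [' ']).map String.ofList := by
  have h : (" " : String).toList = [' '] := rfl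
  simp [PySem.Str.split?, PySem.Chars.split?, h]

def aTail (pfx user : Option String) (parts : List String) :
    Option String × Option String × Option String × Option String × String × List String :=
  let textStart := parts.findIdx? (fun part => PySem.Str.startswith part ":")
  let st2 : Option String × List String :=
    match textStart with
    | some i =>
      let textParts := PySem.List.slice parts (some (i : Int)) none
      let textParts := match textParts with
        | t :: ts => PySem.Str.slice t (some 1) none :: ts
        | [] => []
      (some (PySem.Str.join " " textParts), PySem.List.slice parts none (some (i : Int)))
    | none => (none, parts)
  match st2 with
  | (text, parts) =>
    let ircCommand := parts.headD ""
    let ircArgs := PySem.List.slice parts (some 1) none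
    let channel : Option String :=
      match ircArgs.findIdx? (fun part => PySem.Str.startswith part "#") with
      | some i => some (PySem.Str.slice (ircArgs.getD i "") (some 1) none)
      | none => none
    (pfx, user, channel, text, ircCommand, ircArgs)

def bTail (pfx user : Option String) (rest : String) :
    Option String × Option String × Option String × Option String × String × List String :=
  let cut := PySem.Str.find rest " :"
  let st2 : String × Option String :=
    if cut ≠ -1 then
      (PySem.Str.slice rest none (some cut), some (PySem.Str.slice rest (some (cut + 2)) none))
    else (rest, none)
  match st2 with
  | (rest, text) =>
    let tokens := (PySem.Str.split? rest " ").getD []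
    let ircCommand := tokens.headD ""
    let ircArgs := tokens.tail
    let channel := (ircArgs.find? (fun arg => PySem.Str.startswith arg "#")).map
      (fun arg => PySem.Str.slice arg (some 1) none)
    (pfx, user, channel, text, ircCommand, ircArgs)

lemma hash_toList : ("#" : String).toList = ['#'] := rfl
lemma colon_toList : (":" : String).toList = [':'] := rfl
lemma spacecolon_toList : (" :" : String).toList = [' ', ':'] := rfl

lemma bTail_eq (pfx user : Option String) (s : String) (t1 : List Char) (r : List (List Char))
    (hjoin : s.toList = PySem.Chars.join [' '] (t1 :: r))
    (h1 : ' ' ∉ t1) (hr : ∀ t ∈ r, ' ' ∉ t) (_ht1 : t1.head? ≠ some ':') :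
    bTail pfx user s = coreResult pfx user t1 r := by
  have hfind : PySem.Str.find s " :" = PySem.Chars.find s.toList [' ', ':'] := by
    rw [PySem.Str.find_eq, spacecolon_toList]
  have M := main_scan r t1 h1 hr
  rw [← hjoin] at M
  cases hidx : r.findIdx? (fun t => t.head? == some ':') with
  | none =>
    rw [hidx] at M
    obtain ⟨hf, hs⟩ := M
    have hfS : PySem.Str.find s " :" = -1 := by rw [hfind, hf]
    simp only [bTail, hfS]
    rw [if_neg (by simp)]
    simp only [split?_toList, hs, coreResult, hidx, chanOf, List.map_cons, List.headD_cons,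
      List.tail_cons]
  | some j =>
    rw [hidx] at M
    obtain ⟨hf0, hsplit, hdrop⟩ := M
    have hne : PySem.Str.find s " :" ≠ -1 := by rw [hfind]; omega
    simp only [bTail]
    rw [if_pos hne]
    have htok : (PySem.Str.split? (PySem.Str.slice s none (some (PySem.Str.find s " :"))) " ").getD []
        = (t1 :: r.take j).map String.ofList := by
      rw [split?_toList, PySem.Str.toList_slice, PySem.Chars.slice_eq_listSlice,
          PySem.List.slice_to _ (by rw [hfind]; omega), hfind, hsplit]
    have htext : PySem.Str.slice s (some (PySem.Str.find s " :" + 2)) none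
        = String.ofList (PySem.Chars.join [' '] (decolonTail (r.drop j))) := by
      rw [← String.toList_inj, PySem.Str.toList_slice, PySem.Chars.slice_eq_listSlice,
          PySem.List.slice_from _ (by rw [hfind]; omega), String.toList_ofList]
      have hnn : (PySem.Str.find s " :" + 2).toNat = (PySem.Str.find s " :").toNat + 2 := by
        rw [hfind]; omega
      rw [hnn, hfind, hdrop]
      rfl
    simp only [htok, htext, coreResult, hidx, chanOf, List.map_cons, List.headD_cons,
      List.tail_cons]

lemma pred_ofList_comp (c : Char) :
    ((fun part => PySem.Str.startswith part (String.ofList [c])) ∘ String.ofList) =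
      (fun t : List Char => t.head? == some c) :=
  funext fun t => startswith_ofList t c

lemma slice_one_drop {α : Type} (xs : List α) : PySem.List.slice xs (some 1) none = xs.drop 1 := by
  rw [PySem.List.slice_from xs (by omega : (0:Int) ≤ 1)]
  rfl

lemma slice_natCast_from {α : Type} (xs : List α) (n : Nat) :
    PySem.List.slice xs (some (n : Int)) none = xs.drop n := by
  rw [PySem.List.slice_from xs (by omega : (0:Int) ≤ (n : Int))]
  simp

lemma slice_natCast_to {α : Type} (xs : List α) (n : Nat) :
    PySem.List.slice xs none (some (n : Int)) = xs.take n := by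
  rw [PySem.List.slice_to xs (by omega : (0:Int) ≤ (n : Int))]
  simp

lemma find?_of_findIdx? (xs : List String) (p : String → Bool) (i : Nat)
    (h : xs.findIdx? p = some i) : xs.find? p = some (xs.getD i "") := by
  obtain ⟨hlt, hp, hmin⟩ := List.findIdx?_eq_some_iff_getElem.mp h
  rw [List.getD_eq_getElem _ _ hlt]
  exact List.find?_eq_some_iff_getElem.mpr ⟨hp, i, hlt, rfl, fun j hj => by simp [hmin j hj]⟩

lemma chanOf_none (xs : List String)
    (h : xs.findIdx? (fun part => PySem.Str.startswith part "#") = none) : chanOf xs = none := by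
  unfold chanOf
  rw [List.find?_eq_none.mpr]
  · rfl
  · intro x hx
    have hb := List.findIdx?_eq_none_iff.mp h x hx
    rw [PySem.Str.startswith_eq, hash_toList] at hb
    simp [PySem.Str.startswith_eq, hash_toList, hb]

lemma chanOf_some (xs : List String) (i : Nat)
    (h : xs.findIdx? (fun part => PySem.Str.startswith part "#") = some i) :
    chanOf xs = some (PySem.Str.slice (xs.getD i "") (some 1) none) := by
  unfold chanOf
  rw [find?_of_findIdx? _ _ _ h]
  rfl

lemma aTail_eq (pfx user : Option String) (t1 : List Char) (r : List (List Char))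
    (ht1 : t1.head? ≠ some ':') :
    aTail pfx user ((t1 :: r).map String.ofList) = coreResult pfx user t1 r := by
  have hidxmap : (String.ofList t1 :: r.map String.ofList).findIdx? (fun part => PySem.Str.startswith part ":")
      = Option.map (fun i => i + 1) (r.findIdx? (fun t : List Char => t.head? == some ':')) := by
    rw [← List.map_cons, colon_str, List.findIdx?_map, pred_ofList_comp, List.findIdx?_cons]
    have hb : (t1.head? == some ':') = false := by simp [ht1]
    simp [hb]
  cases hidx : r.findIdx? (fun t : List Char => t.head? == some ':') with
  | none =>
    simp only [aTail, List.map_cons]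
    rw [hidxmap, hidx]
    simp only [Option.map_none, slice_one_drop, List.drop_succ_cons, List.drop_zero,
      coreResult, hidx]
    cases hch : (r.map String.ofList).findIdx? (fun part => PySem.Str.startswith part "#") with
    | none => simp only [chanOf_none _ hch, List.headD_cons]
    | some i => simp only [chanOf_some _ _ hch, List.headD_cons]
  | some j =>
    have hj : j < r.length := (List.findIdx?_eq_some_iff_getElem.mp hidx).1
    obtain ⟨x, xs, hdropj⟩ : ∃ x xs, r.drop j = x :: xs := by
      cases h : r.drop j with
      | nil => exact absurd h (by simp; omega)
      | cons x xs => exact ⟨x, xs, rfl⟩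
    simp only [aTail, List.map_cons]
    rw [hidxmap, hidx]
    simp only [Option.map_some]
    have hslice1 : PySem.List.slice (String.ofList t1 :: r.map String.ofList) (some ((j + 1 : Nat) : Int)) none
        = (r.drop j).map String.ofList := by
      rw [slice_natCast_from]
      simp
    have hslice2 : PySem.List.slice (String.ofList t1 :: r.map String.ofList) none (some ((j + 1 : Nat) : Int))
        = String.ofList t1 :: (r.take j).map String.ofList := by
      rw [slice_natCast_to]
      simp [List.map_take]
    rw [hslice1, hslice2, hdropj]
    simp only [List.map_cons, List.headD_cons, slice_one_drop,
      List.drop_succ_cons, List.drop_zero]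
    have htext : PySem.Str.join " " (PySem.Str.slice (String.ofList x) (some 1) none :: xs.map String.ofList)
        = String.ofList (PySem.Chars.join [' '] (decolonTail (r.drop j))) := by
      rw [← String.toList_inj, PySem.Str.toList_join, String.toList_ofList, hdropj]
      simp only [decolonTail, List.map_cons, slice_drop_ofList, String.toList_ofList, List.map_map]
      have hmtl : (String.toList ∘ String.ofList) = id := by funext l; simp
      rw [hmtl, List.map_id, List.drop_one]
    rw [htext]
    simp only [coreResult, hidx]
    cases hch : ((r.take j).map String.ofList).findIdx? (fun part => PySem.Str.startswith part "#") with
    | none => simp only [chanOf_none _ hch]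
    | some i => simp only [chanOf_some _ _ hch]

lemma A_branch_plain (s : String) (t1 : List Char) (r : List (List Char))
    (hsplit : PySem.Chars.splitOn s.toList [' '] = t1 :: r)
    (ht1 : t1.head? ≠ some ':') :
    TwitchMessage s = aTail none none ((t1 :: r).map String.ofList) := by
  have hstart : PySem.Str.startswith (String.ofList t1) ":" = false := by
    rw [colon_str, startswith_ofList]
    simp [ht1]
  simp only [TwitchMessage, aTail, split?_toList, hsplit, List.map_cons, List.headD_cons, hstart,
    Bool.false_eq_true, if_false]

lemma A_branch_prefix (s : String) (t0 u : List Char)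
    (hdec : s.toList = t0 ++ ' ' :: u) (h0 : ' ' ∉ t0) (hc : t0.head? = some ':') :
    TwitchMessage s = aTail (some (String.ofList (t0.drop 1)))
      (getUserFromPrefix (String.ofList (t0.drop 1)))
      ((PySem.Chars.splitOn u [' ']).map String.ofList) := by
  have hsplit : PySem.Chars.splitOn s.toList [' '] = t0 :: PySem.Chars.splitOn u [' '] := by
    rw [hdec, splitOn_append_space h0]
  have hstart : PySem.Str.startswith (String.ofList t0) ":" = true := by
    rw [colon_str, startswith_ofList]
    simp [hc]
  simp only [TwitchMessage, aTail, split?_toList, hsplit, List.map_cons, List.headD_cons, hstart,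
    if_true, slice_drop_ofList, slice_one_drop, List.drop_succ_cons, List.drop_zero]

lemma B_branch_plain (s : String) (hc : s.toList.head? ≠ some ':') :
    TwitchMessage_alt s = bTail none none s := by
  have hcolB : PySem.Str.startswith s ":" = false := by
    rw [PySem.Str.startswith_eq, colon_toList]
    cases hb : PySem.Chars.startswith s.toList [':'] with
    | false => rfl
    | true => exact absurd ((startswith_single _ _).mp hb) hc
  simp only [TwitchMessage_alt, bTail, hcolB, Bool.false_eq_true, if_false]

lemma B_branch_prefix (s : String) (t0 u : List Char)
    (hdec : s.toList = t0 ++ ' ' :: u) (h0 : ' ' ∉ t0) (hc : t0.head? = some ':') :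
    TwitchMessage_alt s = bTail (some (String.ofList (t0.drop 1)))
      (getUserFromPrefix (String.ofList (t0.drop 1))) (String.ofList u) := by
  have hheads : s.toList.head? = some ':' := by
    rw [hdec]
    cases t0 with
    | nil => simp at hc
    | cons a t0 => simp at hc ⊢; exact hc
  have hcolB : PySem.Str.startswith s ":" = true := by
    rw [PySem.Str.startswith_eq, colon_toList]
    rw [show ([':'] : List Char) = [':'] from rfl]
    cases hb : PySem.Chars.startswith s.toList [':'] with
    | true => rfl
    | false =>
      exfalso
      have := (startswith_single s.toList ':')
      rw [hb] at this
      simp at this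
      exact this hheads
  have hfsp : PySem.Str.find s " " = (t0.length : Int) := by
    rw [PySem.Str.find_eq, show (" " : String).toList = [' '] from rfl, hdec, find_space_pos h0]
  have hne : PySem.Str.find s " " ≠ -1 := by rw [hfsp]; omega
  have hhead : PySem.Str.slice s none (some ((t0.length : Int))) = String.ofList t0 := by
    rw [← String.toList_inj, PySem.Str.toList_slice, PySem.Chars.slice_eq_listSlice,
        PySem.List.slice_to _ (by omega), String.toList_ofList, hdec]
    simp
  have hrest : PySem.Str.slice s (some ((t0.length : Int) + 1)) none = String.ofList u := by
    rw [← String.toList_inj, PySem.Str.toList_slice, PySem.Chars.slice_eq_listSlice,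
        PySem.List.slice_from _ (by omega), String.toList_ofList, hdec]
    have : ((t0.length : Int) + 1).toNat = t0.length + 1 := by omega
    rw [this, show t0 ++ ' ' :: u = (t0 ++ [' ']) ++ u by simp,
        show t0.length + 1 = (t0 ++ [' ']).length + 0 by simp, List.drop_length_add_append]
    rfl
  simp only [TwitchMessage_alt, bTail, hcolB, if_true, hfsp]
  rw [if_neg (by omega : ¬ ((t0.length : Int) = -1))]
  rw [hhead, hrest, slice_drop_ofList]
  rw [if_neg (by omega : ¬ ((t0.length : Int) = -1))]

theorem final_equiv : ∀ (s : String), Pre_TwitchMessage s → TwitchMessage s = TwitchMessage_alt s := by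
  intro s hpre
  by_cases hcol : s.toList.head? = some ':'
  · obtain ⟨hsp, hsec⟩ := hpre hcol
    obtain ⟨hdec, h0⟩ := space_decomp s.toList hsp
    have hc0 : (s.toList.takeWhile (· ≠ ' ')).head? = some ':' :=
      (takeWhile_head? _ ':' (by decide)).mpr hcol
    obtain ⟨⟨r, hr⟩, hj, hns⟩ :=
      splitOn_props ((s.toList.dropWhile (· ≠ ' ')).tail).length ((s.toList.dropWhile (· ≠ ' ')).tail) le_rfl
    have ht1 : (((s.toList.dropWhile (· ≠ ' ')).tail).takeWhile (· ≠ ' ')).head? ≠ some ':' :=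
      fun h => hsec ((takeWhile_head? _ ':' (by decide)).mp h)
    have h1 : ' ' ∉ ((s.toList.dropWhile (· ≠ ' ')).tail).takeWhile (· ≠ ' ') :=
      hns _ (hr ▸ List.mem_cons_self ..)
    have hrns : ∀ t ∈ r, ' ' ∉ t := fun t ht => hns t (hr ▸ List.mem_cons_of_mem _ ht)
    rw [A_branch_prefix s _ _ hdec h0 hc0, B_branch_prefix s _ _ hdec h0 hc0, hr,
        aTail_eq _ _ _ _ ht1,
        bTail_eq _ _ (String.ofList ((s.toList.dropWhile (· ≠ ' ')).tail)) _ r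
          (by rw [String.toList_ofList, ← hr]; exact hj.symm) h1 hrns ht1]
  · obtain ⟨⟨r, hr⟩, hj, hns⟩ := splitOn_props s.toList.length s.toList le_rfl
    have ht1 : ((s.toList.takeWhile (· ≠ ' '))).head? ≠ some ':' :=
      fun h => hcol ((takeWhile_head? _ ':' (by decide)).mp h)
    have h1 : ' ' ∉ s.toList.takeWhile (· ≠ ' ') := hns _ (hr ▸ List.mem_cons_self ..)
    have hrns : ∀ t ∈ r, ' ' ∉ t := fun t ht => hns t (hr ▸ List.mem_cons_of_mem _ ht)
    rw [A_branch_plain s _ r hr ht1, aTail_eq _ _ _ _ ht1, B_branch_plain s hcol,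
        bTail_eq _ _ s _ r (by rw [← hr]; exact hj.symm) h1 hrns ht1]

-- ===== VERDICT (by name: the statement is the Claim_ definition above) =====
theorem TwitchMessage_spec : Claim_equal_TwitchMessage := by
  intro s _ hpre
  unfold Spec_TwitchMessage
  exact final_equiv s hpre
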